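-- pv_equiv track=rewrite | github.com/stankv/Studing | Clear_Code/VariableNames3.py | MadMax
-- ===== SOURCE A (Python) =====
-- def MadMax(N, Tele):
--     is_not_sorted = True    # было xchange
--     while(is_not_sorted):
--         is_not_sorted = False # предполагаем, что массив уже отсортирован
--         for i in range(N - 1):
--             if Tele[i] > Tele[i+1]:
--             # нашли элементы,
--             # неупорядоченные по возрастанию:
--             # меняем их местами:
--                 Tele[i], Tele[i+1] = Tele[i+1], Tele[i]
--             # цикл проверки массива надо продожить снова:
--                 is_not_sorted = True
--
--     # меняем местами срединный элемент и последний (наибольший)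
--     Tele[N // 2 ], Tele[N - 1] = Tele[N - 1], Tele[N // 2]
--
--     # с середины сортируем элементы по убыванию
--     is_not_sorted = True
--     while(is_not_sorted):
--         is_not_sorted = False
--         for i in range((N // 2) + 1, N - 1):
--             if Tele[i] < Tele[i+1]:
--                 Tele[i + 1], Tele[i] = Tele[i], Tele[i + 1]
--                 is_not_sorted = True
--     return Tele
-- ===== SOURCE B (Python) =====
-- def MadMax(N, Tele):
--     # Same in-place transformation as A, but each bubble-sort phase is replaced
--     # by a slice assignment with the built-in sort (Timsort): sort the first N
--     # elements ascending, swap the middle and last of that prefix, then sort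
--     # the tail after the middle descending.
--     mid = N // 2
--     Tele[:N] = sorted(Tele[:N])
--     Tele[mid], Tele[N - 1] = Tele[N - 1], Tele[mid]
--     Tele[mid + 1:N] = sorted(Tele[mid + 1:N], reverse=True)
--     return Tele
-- ===== Notes on version B (the rewrite author's own statement) =====
-- stated objective: faster
-- what changed: Each bubble-sort while-loop (repeated adjacent-swap passes until no change) is replaced by a slice assignment using the built-in sort: Tele[:N] = sorted(Tele[:N]) and Tele[N//2+1:N] = sorted(..., reverse=True), keeping the identical mid/last swap line.
-- outside the precondition, e.g. on MadMax(-1, [1, 2, 3]): A returns [1, 3, 2], B returns [3, 1, 2]; on MadMax(0, []): A raises IndexError, B raises IndexError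
import Mathlib
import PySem

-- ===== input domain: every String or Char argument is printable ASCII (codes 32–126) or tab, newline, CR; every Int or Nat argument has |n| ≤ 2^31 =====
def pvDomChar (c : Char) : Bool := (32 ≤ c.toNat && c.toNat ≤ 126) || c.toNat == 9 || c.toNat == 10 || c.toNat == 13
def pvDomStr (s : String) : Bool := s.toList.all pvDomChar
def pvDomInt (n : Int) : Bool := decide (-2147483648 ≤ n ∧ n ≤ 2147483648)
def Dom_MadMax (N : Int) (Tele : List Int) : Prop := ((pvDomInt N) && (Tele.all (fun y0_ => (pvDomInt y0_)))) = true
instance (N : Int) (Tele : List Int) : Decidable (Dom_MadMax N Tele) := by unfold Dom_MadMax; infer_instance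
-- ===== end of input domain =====

-- B replaces each bubble-sort while-loop of A with a slice assignment using the built-in sort
-- (ascending on Tele[:N], descending on Tele[N//2+1:N]). Both Pythons mutate Tele in place to
-- the same final state on Pre_; the equivalence proved here is about the RETURN value.

-- ===== PORT A =====
-- the tuple assignment 'Tele[i], Tele[j] = Tele[j], Tele[i]' (identical line in both sources)
def pySwap (t : List Int) (i j : Int) : List Int :=
  let a := PySem.List.pyGetD t j 0
  let b := PySem.List.pyGetD t i 0
  PySem.List.pySetD (PySem.List.pySetD t i a) j b

-- loop body of both inner for-loops of A: compare Tele[i] with Tele[i+1], swap, set the flag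
def bubStep (cmp : Int → Int → Bool) (s : List Int × Bool) (i : Int) : List Int × Bool :=
  if cmp (PySem.List.pyGetD s.1 i 0) (PySem.List.pyGetD s.1 (i + 1) 0) then
    (pySwap s.1 i (i + 1), true)
  else s

-- one 'for i in range(lo, hi)' pass of A, with the flag reset to False first
def bubPass (cmp : Int → Int → Bool) (lo hi : Int) (t : List Int) : List Int × Bool :=
  (PySem.List.pyRange lo hi 1).foldl (bubStep cmp) (t, false)

-- the 'while is_not_sorted' loop; the fuel guard only makes it total: inside Pre_
-- the no-swap pass is reached before the fuel runs out (proved below)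
def bubLoop (cmp : Int → Int → Bool) (lo hi : Int) : Nat → List Int → List Int
  | 0, t => t
  | fuel + 1, t =>
      let s := bubPass cmp lo hi t
      if s.2 then bubLoop cmp lo hi fuel s.1 else s.1

def MadMax (N : Int) (Tele : List Int) : List Int :=
  let fuel := Tele.length * Tele.length + 2
  let t1 := bubLoop (fun a b => b < a) 0 (N - 1) fuel Tele
  let t2 := pySwap t1 (PySem.Int.floordiv N 2) (N - 1)
  bubLoop (fun a b => a < b) (PySem.Int.floordiv N 2 + 1) (N - 1) fuel t2

-- ===== PORT B =====
-- Python slice assignment 'Tele[a:b] = X' (a omitted = start of the list)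
def setSlice (t : List Int) (a? : Option Int) (b : Int) (X : List Int) : List Int :=
  let lo : Nat := match a? with | none => 0 | some a => PySem.List.clampIdx t.length a
  let hi : Nat := PySem.List.clampIdx t.length b
  t.take lo ++ X ++ t.drop (max lo hi)

def MadMax_alt (N : Int) (Tele : List Int) : List Int :=
  let mid := PySem.Int.floordiv N 2
  let t1 := setSlice Tele none N
      (PySem.List.sorted (PySem.List.slice Tele none (some N)) (fun x => x))
  let t2 := pySwap t1 mid (N - 1)
  setSlice t2 (some (mid + 1)) N
      (PySem.List.sorted (PySem.List.slice t2 (some (mid + 1)) (some N)) (fun x => x) true)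

-- ===== PRECONDITION & SPEC =====
-- Pre_ excludes (a) N > len(Tele), and N = 0 with empty Tele, where A raises IndexError, and
-- (b) negative N — a negative count, outside the task's natural domain, where A's single
-- wraparound swap Tele[N//2], Tele[N-1] relies on accidental negative-index semantics.
def Pre_MadMax (N : Int) (Tele : List Int) : Prop :=
  0 ≤ N ∧ N ≤ Tele.length ∧ Tele ≠ []
instance (N : Int) (Tele : List Int) : Decidable (Pre_MadMax N Tele) := by
  unfold Pre_MadMax; infer_instance

def pvWitness_MadMax : Int × List Int := (4, [3, 1, 4, 2, 9])

def Spec_MadMax (N : Int) (Tele : List Int) (out : List Int) : Prop := out = MadMax_alt N Tele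
instance (N : Int) (Tele : List Int) (out : List Int) : Decidable (Spec_MadMax N Tele out) := by
  unfold Spec_MadMax; infer_instance

-- ===== CLAIM (what is proved, stated in full; the proofs are below) =====
def Claim_equal_MadMax : Prop := ∀ (N : Int) (Tele : List Int), Dom_MadMax N Tele → Pre_MadMax N Tele → Spec_MadMax N Tele (MadMax N Tele)

-- ===== LEMMAS AND PROOFS =====

-- structural one-pass bubble over a plain list, swapping adjacent a, b when cmp a b
def bp (cmp : Int → Int → Bool) : List Int → List Int × Bool
  | [] => ([], false)
  | [a] => ([a], false)
  | a :: b :: r =>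
    if cmp a b then
      let s := bp cmp (a :: r); (b :: s.1, true)
    else
      let s := bp cmp (b :: r); (a :: s.1, s.2)

-- number of inverted pairs w.r.t. cmp (head against tail, recursively)
def inv (cmp : Int → Int → Bool) : List Int → Nat
  | [] => 0
  | a :: l => l.countP (cmp a) + inv cmp l

-- bubble passes until the flag is false (with fuel)
def bloop (cmp : Int → Int → Bool) : Nat → List Int → List Int
  | 0, s => s
  | fuel + 1, s => let p := bp cmp s; if p.2 then bloop cmp fuel p.1 else p.1

theorem bp_perm (cmp : Int → Int → Bool) : (l : List Int) → (bp cmp l).1.Perm l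
  | [] => by simp [bp]
  | [a] => by simp [bp]
  | a :: b :: r => by
    by_cases h : cmp a b = true
    · simp only [bp, h, if_true]
      exact ((bp_perm cmp (a :: r)).cons b).trans (List.Perm.swap' a b (List.Perm.refl r))
    · simp only [bp, Bool.not_eq_true] at *
      simp only [h, Bool.false_eq_true, if_false]
      exact (bp_perm cmp (b :: r)).cons a

theorem bp_false_eq (cmp : Int → Int → Bool) : (l : List Int) → (bp cmp l).2 = false → (bp cmp l).1 = l
  | [] => by simp [bp]
  | [a] => by simp [bp]
  | a :: b :: r => by
    by_cases h : cmp a b = true <;> simp only [bp, h, Bool.false_eq_true, if_true, if_false]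
    · simp
    · intro h2
      simp [bp_false_eq cmp (b :: r) h2]

theorem bp_false_pairwise (cmp : Int → Int → Bool)
    (htr : ∀ a b c, cmp a b = false → cmp b c = false → cmp a c = false) :
    (l : List Int) → (bp cmp l).2 = false → l.Pairwise (fun a b => cmp a b = false)
  | [] => by simp
  | [a] => by simp
  | a :: b :: r => by
    by_cases h : cmp a b = true <;> simp only [bp, h, Bool.false_eq_true, if_true, if_false]
    · simp
    · intro h2
      have ih := bp_false_pairwise cmp htr (b :: r) h2
      have hb : ∀ x ∈ b :: r, cmp a x = false := by
        intro x hx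
        rcases List.mem_cons.1 hx with rfl | hx
        · simpa using h
        · exact htr a b x (by simpa using h) ((List.pairwise_cons.1 ih).1 x hx)
      exact List.pairwise_cons.2 ⟨hb, ih⟩

theorem inv_cons (cmp : Int → Int → Bool) (x : Int) (l : List Int) :
    inv cmp (x :: l) = l.countP (cmp x) + inv cmp l := rfl

theorem bp_inv (cmp : Int → Int → Bool)
    (hasym : ∀ a b, cmp a b = true → cmp b a = false) :
    (l : List Int) → inv cmp (bp cmp l).1 ≤ inv cmp l ∧
      ((bp cmp l).2 = true → inv cmp (bp cmp l).1 < inv cmp l)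
  | [] => by simp [bp]
  | [a] => by simp [bp]
  | a :: b :: r => by
    by_cases h : cmp a b = true <;>
      simp only [bp, h, Bool.false_eq_true, if_true, if_false]
    · -- swap case: result is b :: (bp (a :: r)).1, flag true
      have ih := (bp_inv cmp hasym (a :: r)).1
      have hca : cmp b a = false := hasym a b h
      have hcount : ((bp cmp (a :: r)).1).countP (cmp b) = (a :: r).countP (cmp b) :=
        (bp_perm cmp (a :: r)).countP_eq _
      have e1 : (a :: r).countP (cmp b) = r.countP (cmp b) := by
        simp [hca]
      have e2 : (b :: r).countP (cmp a) = r.countP (cmp a) + 1 := by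
        simp [h]
      have goal : inv cmp (b :: (bp cmp (a :: r)).1) < inv cmp (a :: b :: r) := by
        rw [inv_cons, inv_cons, inv_cons, hcount, e1, e2]
        rw [inv_cons] at ih
        omega
      exact ⟨le_of_lt goal, fun _ => goal⟩
    · -- no swap: result is a :: (bp (b :: r)).1, flag propagated
      have ih := bp_inv cmp hasym (b :: r)
      have hcount : ((bp cmp (b :: r)).1).countP (cmp a) = (b :: r).countP (cmp a) :=
        (bp_perm cmp (b :: r)).countP_eq _
      constructor
      · rw [inv_cons, inv_cons, hcount]
        have := ih.1
        omega
      · intro ht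
        rw [inv_cons, inv_cons, hcount]
        have := ih.2 ht
        omega

theorem inv_le_sq (cmp : Int → Int → Bool) : (l : List Int) → inv cmp l ≤ l.length * l.length
  | [] => by simp [inv]
  | a :: l => by
    have h1 := inv_le_sq cmp l
    have h2 : l.countP (cmp a) ≤ l.length := List.countP_le_length
    simp only [inv, List.length_cons]
    nlinarith

theorem bloop_spec (cmp : Int → Int → Bool)
    (hasym : ∀ a b, cmp a b = true → cmp b a = false)
    (htr : ∀ a b c, cmp a b = false → cmp b c = false → cmp a c = false) :
    (fuel : Nat) → (s : List Int) → inv cmp s < fuel →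
    (bloop cmp fuel s).Perm s ∧
      (bloop cmp fuel s).Pairwise (fun a b => cmp a b = false)
  | 0, s, hf => by omega
  | fuel + 1, s, hf => by
    simp only [bloop]
    by_cases h : (bp cmp s).2 = true
    · simp only [h, if_true]
      have hlt := (bp_inv cmp hasym s).2 h
      have ih := bloop_spec cmp hasym htr fuel (bp cmp s).1 (by omega)
      exact ⟨ih.1.trans (bp_perm cmp s), ih.2⟩
    · simp only [Bool.not_eq_true] at h
      simp only [h, Bool.false_eq_true, if_false]
      rw [bp_false_eq cmp s h]
      exact ⟨List.Perm.refl s, bp_false_pairwise cmp htr s h⟩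

theorem pyGetD_mid (pre l suf : List Int) (x : Int) :
    PySem.List.pyGetD (pre ++ x :: l ++ suf) (pre.length : Int) 0 = x := by
  rw [PySem.List.pyGetD_natCast]
  simp [List.getD_eq_getElem?_getD]

theorem pyGetD_mid1 (pre l suf : List Int) (x y : Int) :
    PySem.List.pyGetD (pre ++ x :: y :: l ++ suf) ((pre.length : Int) + 1) 0 = y := by
  have : (pre.length : Int) + 1 = ((pre.length + 1 : Nat) : Int) := by push_cast; ring
  rw [this, PySem.List.pyGetD_natCast]
  simp [List.getD_eq_getElem?_getD]

theorem pySwap_mid (pre l suf : List Int) (x y : Int) :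
    pySwap (pre ++ x :: y :: l ++ suf) (pre.length : Int) ((pre.length : Int) + 1)
      = pre ++ y :: x :: l ++ suf := by
  show PySem.List.pySetD
      (PySem.List.pySetD (pre ++ x :: y :: l ++ suf) (pre.length : Int)
        (PySem.List.pyGetD (pre ++ x :: y :: l ++ suf) ((pre.length : Int) + 1) 0))
      ((pre.length : Int) + 1)
      (PySem.List.pyGetD (pre ++ x :: y :: l ++ suf) (pre.length : Int) 0)
    = pre ++ y :: x :: l ++ suf
  rw [pyGetD_mid1, pyGetD_mid]
  have h1 : ((pre.length : Int) + 1) = ((pre.length + 1 : Nat) : Int) := by push_cast; ring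
  rw [PySem.List.pySetD_natCast, h1, PySem.List.pySetD_natCast]
  simp

theorem length_pySwap (t : List Int) (i j : Int) : (pySwap t i j).length = t.length := by
  simp [pySwap, PySem.List.length_pySetD]

theorem pass_seg (cmp : Int → Int → Bool) : (s : List Int) → ∀ (pre suf : List Int) (f : Bool)
    (lo hi : Int), lo = pre.length → hi = lo + s.length - 1 →
    (PySem.List.pyRange lo hi 1).foldl (bubStep cmp) (pre ++ s ++ suf, f)
      = (pre ++ (bp cmp s).1 ++ suf, f || (bp cmp s).2)
  | [] => by
    intro pre suf f lo hi hlo hhi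
    rw [PySem.List.pyRange_one_eq_nil (by simp at hhi; omega)]
    simp [bp]
  | [a] => by
    intro pre suf f lo hi hlo hhi
    rw [PySem.List.pyRange_one_eq_nil (by simp at hhi; omega)]
    simp [bp]
  | a :: b :: r => by
    intro pre suf f lo hi hlo hhi
    have hlt : lo < hi := by simp at hhi; omega
    rw [PySem.List.pyRange_one_cons hlt, List.foldl_cons]
    subst hlo
    by_cases hc : cmp a b = true
    · have estep : bubStep cmp (pre ++ a :: b :: r ++ suf, f) (pre.length : Int)
          = (pre ++ b :: a :: r ++ suf, true) := by
        simp only [bubStep, pyGetD_mid, pyGetD_mid1, hc, if_true, pySwap_mid]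
      rw [estep]
      have h1 : (pre ++ b :: a :: r ++ suf) = (pre ++ [b]) ++ (a :: r) ++ suf := by simp
      have h3 : hi = ((pre ++ [b]).length : Int) + (a :: r).length - 1 := by
        simp at hhi ⊢; omega
      have h2 : ((pre.length : Int) + 1) = ((pre ++ [b]).length : Int) := by simp
      rw [h1, h2]
      rw [pass_seg cmp (a :: r) (pre ++ [b]) suf true _ hi rfl h3]
      simp [bp, hc]
    · have estep : bubStep cmp (pre ++ a :: b :: r ++ suf, f) (pre.length : Int)
          = (pre ++ a :: b :: r ++ suf, f) := by
        simp only [bubStep, pyGetD_mid, pyGetD_mid1, hc, Bool.false_eq_true, if_false]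
      rw [estep]
      have h1 : (pre ++ a :: b :: r ++ suf) = (pre ++ [a]) ++ (b :: r) ++ suf := by simp
      have h3 : hi = ((pre ++ [a]).length : Int) + (b :: r).length - 1 := by
        simp at hhi ⊢; omega
      have h2 : ((pre.length : Int) + 1) = ((pre ++ [a]).length : Int) := by simp
      rw [h1, h2]
      rw [pass_seg cmp (b :: r) (pre ++ [a]) suf f _ hi rfl h3]
      simp [bp, hc]

theorem loop_seg (cmp : Int → Int → Bool) : (fuel : Nat) → ∀ (pre s suf : List Int) (lo hi : Int),
    lo = pre.length → hi = lo + s.length - 1 →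
    bubLoop cmp lo hi fuel (pre ++ s ++ suf) = pre ++ bloop cmp fuel s ++ suf
  | 0 => by intro pre s suf lo hi hlo hhi; simp [bubLoop, bloop]
  | fuel + 1 => by
    intro pre s suf lo hi hlo hhi
    simp only [bubLoop, bloop, bubPass]
    rw [pass_seg cmp s pre suf false lo hi hlo hhi]
    simp only [Bool.false_or]
    by_cases h : (bp cmp s).2 = true
    · simp only [h, if_true]
      exact loop_seg cmp fuel pre (bp cmp s).1 suf lo hi hlo
        (by rw [hhi, (bp_perm cmp s).length_eq])
    · simp only [Bool.not_eq_true] at h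
      simp only [h, Bool.false_eq_true, if_false]

theorem bubLoop_nilrange (cmp : Int → Int → Bool) (lo hi : Int) (h : hi ≤ lo) :
    ∀ (fuel : Nat) (t : List Int), bubLoop cmp lo hi fuel t = t := by
  intro fuel t
  cases fuel with
  | zero => simp [bubLoop]
  | succ n => simp [bubLoop, bubPass, PySem.List.pyRange_one_eq_nil h]

theorem madmax_eq (N : Int) (Tele : List Int)
    (h0 : 0 ≤ N) (hlen : N ≤ Tele.length) (hne : Tele ≠ []) :
    MadMax N Tele = MadMax_alt N Tele := by
  obtain ⟨n, rfl⟩ : ∃ n : Nat, N = (n : Int) := ⟨N.toNat, (Int.toNat_of_nonneg h0).symm⟩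
  have hnlen : n ≤ Tele.length := by exact_mod_cast hlen
  have hlpos : 0 < Tele.length := List.length_pos_iff.mpr hne
  have hasym1 : ∀ a b : Int, (decide (b < a)) = true → (decide (a < b)) = false := by
    intro a b h; simp at *; omega
  have htr1 : ∀ a b c : Int, (decide (b < a)) = false → (decide (c < b)) = false →
      (decide (c < a)) = false := by
    intro a b c h1 h2; simp at *; omega
  have hasym2 : ∀ a b : Int, (decide (a < b)) = true → (decide (b < a)) = false := by
    intro a b h; simp at *; omega
  have htr2 : ∀ a b c : Int, (decide (a < b)) = false → (decide (b < c)) = false →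
      (decide (a < c)) = false := by
    intro a b c h1 h2; simp at *; omega
  have hmid : PySem.Int.floordiv (n : Int) 2 = ((n / 2 : Nat) : Int) := by
    exact_mod_cast PySem.Int.floordiv_natCast n 2
  have hfuelpos : 0 < Tele.length * Tele.length + 2 := by omega
  simp only [MadMax, MadMax_alt]
  rw [hmid]
  set fuel := Tele.length * Tele.length + 2 with hfueldef
  set m := n / 2 with hmdef
  set cmp1 : Int → Int → Bool := fun a b => decide (b < a) with hc1
  set cmp2 : Int → Int → Bool := fun a b => decide (a < b) with hc2
  -- ===== phase 1 =====
  have hslen : (Tele.take n).length = n := by simp [hnlen]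
  have hbound1 : inv cmp1 (Tele.take n) < fuel := by
    have h1 := inv_le_sq cmp1 (Tele.take n)
    rw [hslen] at h1
    have : n * n ≤ Tele.length * Tele.length := Nat.mul_le_mul hnlen hnlen
    omega
  have hX1 := bloop_spec cmp1 hasym1 htr1 fuel (Tele.take n) hbound1
  set X1 := bloop cmp1 fuel (Tele.take n) with hX1def
  have e1A : bubLoop cmp1 0 ((n : Int) - 1) fuel Tele = X1 ++ Tele.drop n := by
    conv_lhs => rw [show Tele = [] ++ Tele.take n ++ Tele.drop n by simp]
    rw [loop_seg cmp1 fuel [] (Tele.take n) (Tele.drop n) 0 ((n : Int) - 1)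
      (by simp) (by simp [hslen])]
    simp only [List.nil_append]
    rw [← hX1def]
  have e1B : setSlice Tele none (n : Int)
      (PySem.List.sorted (PySem.List.slice Tele none (some (n : Int))) (fun x => x))
      = X1 ++ Tele.drop n := by
    rw [PySem.List.slice_to Tele (by exact_mod_cast h0)]
    have hsorted : (PySem.List.sorted (Tele.take (Int.toNat (n : Int))) (fun x => x)) = X1 := by
      simp only [Int.toNat_natCast]
      exact PySem.List.sorted_id_eq_of_perm_of_pairwise _ _ hX1.1
        (hX1.2.imp (by intro a b hab; rw [hc1] at hab; simp at hab; omega))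
    rw [hsorted]
    simp only [setSlice]
    rw [PySem.List.clampIdx_natCast, Nat.min_eq_left hnlen]
    simp
  rw [e1A, e1B]
  set t2 := pySwap (X1 ++ Tele.drop n) ((m : Int)) ((n : Int) - 1) with ht2def
  have hX1len : X1.length = n := by rw [hX1.1.length_eq, hslen]
  have ht2len : t2.length = Tele.length := by
    rw [ht2def, length_pySwap]
    simp [hX1len, hnlen]
  have hcast1 : ((m : Int) + 1) = ((m + 1 : Nat) : Int) := by push_cast; ring
  by_cases hn0 : n = 0
  · -- N = 0: both phase-2 loops are empty / the slice assignment is a no-op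
    have hm0 : m = 0 := by simp [hmdef, hn0]
    rw [bubLoop_nilrange cmp2 ((m : Int) + 1) ((n : Int) - 1) (by omega) fuel t2]
    have hsl : PySem.List.slice t2 (some ((m : Int) + 1)) (some (n : Int)) = [] := by
      rw [hcast1, PySem.List.slice_natCast]
      simp [hn0]
    rw [hsl]
    have hsort : PySem.List.sorted ([] : List Int) (fun x => x) true = [] :=
      (PySem.List.sorted_perm ([] : List Int) (fun x => x) true).eq_nil
    rw [hsort]
    simp only [setSlice]
    rw [hcast1, PySem.List.clampIdx_natCast, PySem.List.clampIdx_natCast]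
    rw [hm0, hn0]
    have h1 : min (0 + 1) t2.length = 1 := by rw [ht2len]; omega
    rw [h1]
    have h2 : max 1 (min 0 t2.length) = 1 := by omega
    rw [h2]
    simp only [List.append_nil]
    exact (List.take_append_drop 1 t2).symm
  · -- 1 ≤ n: phase 2 descending-sorts the segment m+1 .. n-1
    have hn1 : 1 ≤ n := by omega
    have hm1n : m + 1 ≤ n := by omega
    set s2 := (t2.drop (m + 1)).take (n - (m + 1)) with hs2def
    have hs2len : s2.length = n - (m + 1) := by
      rw [hs2def]
      simp [ht2len]
      omega
    have hdd : t2.drop (m + 1) = s2 ++ t2.drop n := by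
      rw [hs2def]
      conv_lhs => rw [← List.take_append_drop (n - (m + 1)) (t2.drop (m + 1))]
      rw [List.drop_drop]
      congr 2
      omega
    have hdecomp2 : t2 = t2.take (m + 1) ++ s2 ++ t2.drop n := by
      conv_lhs => rw [← List.take_append_drop (m + 1) t2]
      rw [hdd, ← List.append_assoc]
    have hprelen : (t2.take (m + 1)).length = m + 1 := by
      simp [ht2len]; omega
    have hbound2 : inv cmp2 s2 < fuel := by
      have h1 := inv_le_sq cmp2 s2
      rw [hs2len] at h1
      have h2 : n - (m + 1) ≤ Tele.length := by omega
      have : (n - (m + 1)) * (n - (m + 1)) ≤ Tele.length * Tele.length :=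
        Nat.mul_le_mul h2 h2
      omega
    have hX2 := bloop_spec cmp2 hasym2 htr2 fuel s2 hbound2
    set X2 := bloop cmp2 fuel s2 with hX2def
    have e2A : bubLoop cmp2 ((m : Int) + 1) ((n : Int) - 1) fuel t2
        = t2.take (m + 1) ++ X2 ++ t2.drop n := by
      conv_lhs => rw [hdecomp2]
      rw [loop_seg cmp2 fuel (t2.take (m + 1)) s2 (t2.drop n) ((m : Int) + 1) ((n : Int) - 1)
        (by rw [hprelen]; push_cast; ring) (by rw [hs2len]; omega)]
    rw [e2A]
    -- B side
    have hsl : PySem.List.slice t2 (some ((m : Int) + 1)) (some (n : Int)) = s2 := by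
      rw [hcast1, PySem.List.slice_natCast, hs2def]
    rw [hsl]
    have hsort : PySem.List.sorted s2 (fun x => x) true = X2 := by
      refine List.Perm.eq_of_pairwise ?_ ?_ ?_ ?_
        (le := fun a b : Int => b ≤ a)
      · intro a b _ _ h1 h2; omega
      · exact PySem.List.sorted_pairwise_rev s2 (fun x => x)
      · exact hX2.2.imp (by intro a b hab; rw [hc2] at hab; simp at hab; omega)
      · exact (PySem.List.sorted_perm s2 (fun x => x) true).trans hX2.1.symm
    rw [hsort]
    simp only [setSlice]
    rw [hcast1, PySem.List.clampIdx_natCast, PySem.List.clampIdx_natCast]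
    have h1 : min (m + 1) t2.length = m + 1 := by rw [ht2len]; omega
    have h2 : min n t2.length = n := by rw [ht2len]; omega
    rw [h1, h2]
    have h3 : max (m + 1) n = n := by omega
    rw [h3]

theorem MadMax_spec : Claim_equal_MadMax := by
  intro N Tele _ hpre
  exact madmax_eq N Tele hpre.1 hpre.2.1 hpre.2.2
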